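-- pv_equiv track=rewrite | github.com/ripetangerine/algorithm | 프로그래머스/1/76501. 음양 더하기/음양 더하기.py | solution
-- ===== SOURCE A (Python) =====
-- def solution(absolutes, signs):
--
--     num = 0
--     for i in range(len(absolutes)):
--         if signs[i]==False:
--             num+= -absolutes[i]
--         else :
--             num+= absolutes[i]
--
--     return num
-- ===== SOURCE B (Python) =====
-- def solution(absolutes, signs):
--     total = 0
--     for i in range(len(absolutes)):
--         total += absolutes[i]
--     negsum = 0
--     for i in range(len(absolutes)):
--         if not signs[i]:
--             negsum += absolutes[i]
--     return total - 2 * negsum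
-- ===== Notes on version B (the rewrite author's own statement) =====
-- stated objective: alternative
-- what changed: B replaces A's single signed accumulation with two unsigned aggregations (grand total and sum of negatively-signed absolutes) combined by the closed form total - 2*negsum.
import Mathlib
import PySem

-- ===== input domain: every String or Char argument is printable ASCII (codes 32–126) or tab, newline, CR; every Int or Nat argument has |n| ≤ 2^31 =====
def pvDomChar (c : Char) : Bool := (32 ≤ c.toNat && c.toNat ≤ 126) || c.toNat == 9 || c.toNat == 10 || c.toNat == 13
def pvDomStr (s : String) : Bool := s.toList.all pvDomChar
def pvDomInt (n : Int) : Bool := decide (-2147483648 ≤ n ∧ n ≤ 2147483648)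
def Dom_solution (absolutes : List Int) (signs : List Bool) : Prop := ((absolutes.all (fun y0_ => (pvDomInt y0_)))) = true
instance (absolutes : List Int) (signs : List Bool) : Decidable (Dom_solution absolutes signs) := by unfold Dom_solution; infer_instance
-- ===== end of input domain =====

-- B replaces A's single signed pass with two plain aggregations (total and sum of negatives) combined as total - 2*negsum.

-- ===== PORT A =====
def solution (absolutes : List Int) (signs : List Bool) : Int :=
  (PySem.List.pyRange 0 absolutes.length 1).foldl
    (fun num i =>
      if PySem.List.pyGetD signs i false == false then
        num + -(PySem.List.pyGetD absolutes i 0)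
      else
        num + PySem.List.pyGetD absolutes i 0) 0

-- ===== PORT B =====
def solution_alt (absolutes : List Int) (signs : List Bool) : Int :=
  let total :=
    (PySem.List.pyRange 0 absolutes.length 1).foldl
      (fun total i => total + PySem.List.pyGetD absolutes i 0) 0
  let negsum :=
    (PySem.List.pyRange 0 absolutes.length 1).foldl
      (fun negsum i =>
        if !(PySem.List.pyGetD signs i false) then
          negsum + PySem.List.pyGetD absolutes i 0
        else negsum) 0
  total - 2 * negsum

-- ===== PRECONDITION & SPEC =====
-- Pre_ excludes exactly the inputs where signs is shorter than absolutes, on which Python A raises IndexError.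
def Pre_solution (absolutes : List Int) (signs : List Bool) : Prop :=
  absolutes.length ≤ signs.length
instance (absolutes : List Int) (signs : List Bool) : Decidable (Pre_solution absolutes signs) := by
  unfold Pre_solution; infer_instance
def pvWitness_solution : List Int × List Bool := ([4, 7, 12], [true, false, true])

def Spec_solution (absolutes : List Int) (signs : List Bool) (out : Int) : Prop := out = solution_alt absolutes signs
instance (absolutes : List Int) (signs : List Bool) (out : Int) : Decidable (Spec_solution absolutes signs out) := by unfold Spec_solution; infer_instance

-- ===== CLAIM (what is proved, stated in full; the proofs are below) =====
def Claim_equal_solution : Prop := ∀ (absolutes : List Int) (signs : List Bool), Dom_solution absolutes signs → Pre_solution absolutes signs → Spec_solution absolutes signs (solution absolutes signs)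

-- ===== LEMMAS AND PROOFS =====

-- A foldl whose step adds a value independent of the accumulator is acc + sum of those values.
theorem foldl_add_g (g : Int → Int) (L : List Int) (acc : Int) :
    L.foldl (fun n i => n + g i) acc = acc + (L.map g).sum := by
  induction L generalizing acc with
  | nil => simp
  | cons x xs ih => simp [ih, add_assoc]

theorem sum_map_comb (f h : Int → Int) (L : List Int) :
    (L.map (fun i => f i - 2 * h i)).sum = (L.map f).sum - 2 * (L.map h).sum := by
  induction L with
  | nil => simp
  | cons x xs ih => simp [ih]; ring

theorem solution_spec : Claim_equal_solution := by
  intro absolutes signs _ _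
  unfold Spec_solution solution solution_alt
  have hA : (fun (num i : Int) =>
      if PySem.List.pyGetD signs i false == false then
        num + -(PySem.List.pyGetD absolutes i 0)
      else
        num + PySem.List.pyGetD absolutes i 0)
      = (fun num i => num + (fun i =>
          (PySem.List.pyGetD absolutes i 0) -
            2 * (if !(PySem.List.pyGetD signs i false) then PySem.List.pyGetD absolutes i 0 else 0)) i) := by
    funext num i
    by_cases h : PySem.List.pyGetD signs i false = false <;> simp [h] <;> ring
  have hN : (fun (negsum i : Int) =>
      if !(PySem.List.pyGetD signs i false) then
        negsum + PySem.List.pyGetD absolutes i 0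
      else negsum)
      = (fun negsum i => negsum + (fun i =>
          if !(PySem.List.pyGetD signs i false) then PySem.List.pyGetD absolutes i 0 else 0) i) := by
    funext negsum i
    by_cases h : PySem.List.pyGetD signs i false = false <;> simp [h]
  rw [hA, hN, foldl_add_g, foldl_add_g, foldl_add_g, sum_map_comb]
  ring
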